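-- pv_equiv track=rewrite | github.com/MonLuc2a/YnovB2_PythonDataManipulation | TD1/td1.py | compte_mots_3_lettres
-- ===== SOURCE A (Python) =====
-- def compte_mots_3_lettres(sequence):
--     dico = {}
--     for i in range(len(sequence) - 2):
--         mot = sequence[i:i + 3]
--         if mot in dico:
--             dico[mot] += 1
--         else:
--             dico[mot] = 1
--     return dico
-- ===== SOURCE B (Python) =====
-- def compte_mots_3_lettres(sequence):
--     subs = [sequence[i:i + 3] for i in range(len(sequence) - 2)]
--     return {mot: subs.count(mot) for mot in dict.fromkeys(subs)}
-- ===== Notes on version B (the rewrite author's own statement) =====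
-- stated objective: alternative
-- what changed: B replaces A's running-dict accumulation with a two-phase scheme: materialise the list of 3-letter substrings once, dedup it in first-occurrence order, and count each distinct key with list.count.
import Mathlib
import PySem

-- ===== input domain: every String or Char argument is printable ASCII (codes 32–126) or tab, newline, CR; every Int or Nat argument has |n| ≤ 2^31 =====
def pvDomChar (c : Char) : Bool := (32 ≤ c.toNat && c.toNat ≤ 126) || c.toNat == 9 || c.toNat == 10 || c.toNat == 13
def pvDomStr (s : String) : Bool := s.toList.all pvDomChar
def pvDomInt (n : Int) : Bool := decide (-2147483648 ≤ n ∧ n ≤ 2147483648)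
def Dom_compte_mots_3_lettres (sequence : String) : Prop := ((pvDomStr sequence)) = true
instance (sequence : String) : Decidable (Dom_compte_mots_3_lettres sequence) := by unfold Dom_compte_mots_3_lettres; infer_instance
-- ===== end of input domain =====

-- B builds the substring list once, dedups it in first-occurrence order and counts each key,
-- instead of A's running dict updated during the scan (alternative decomposition, same result).

-- ===== PORT A =====
-- dico = {}; for i in range(len(sequence)-2): mot = sequence[i:i+3]; if mot in dico: dico[mot] += 1 else dico[mot] = 1
def compte_mots_3_lettres (sequence : String) : List (String × Int) :=
  let s := sequence.toList
  ((PySem.List.pyRange 0 ((s.length : Int) - 2) 1).foldl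
    (fun (d : PySem.Dict String Int) i =>
      let mot := String.ofList (PySem.List.slice s (some i) (some (i + 3)))
      if d.contains mot then d.insert mot (d.getD mot 0 + 1) else d.insert mot 1)
    PySem.Dict.empty).items

-- ===== PORT B =====
-- subs = [sequence[i:i+3] for i in range(len(sequence)-2)]; {mot: subs.count(mot) for mot in dict.fromkeys(subs)}
def compte_mots_3_lettres_alt (sequence : String) : List (String × Int) :=
  let s := sequence.toList
  let subs := (PySem.List.pyRange 0 ((s.length : Int) - 2) 1).map
    (fun i => String.ofList (PySem.List.slice s (some i) (some (i + 3))))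
  (PySem.List.dedup subs).map (fun mot => (mot, (subs.count mot : Int)))

-- ===== PRECONDITION & SPEC =====
def Spec_compte_mots_3_lettres (sequence : String) (out : List (String × Int)) : Prop := out = compte_mots_3_lettres_alt sequence
instance (sequence : String) (out : List (String × Int)) : Decidable (Spec_compte_mots_3_lettres sequence out) := by unfold Spec_compte_mots_3_lettres; infer_instance

-- ===== CLAIM (what is proved, stated in full; the proofs are below) =====
def Claim_equal_compte_mots_3_lettres : Prop := ∀ (sequence : String), Dom_compte_mots_3_lettres sequence → Spec_compte_mots_3_lettres sequence (compte_mots_3_lettres sequence)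

-- ===== LEMMAS AND PROOFS =====

-- A's loop over the indices, with each substring computed in place, yields exactly the items of
-- the counter of the substring list: B's dedup-then-count list.
theorem pv_fold (l : List Int) (g : Int -> String) :
    (l.foldl (fun (d : PySem.Dict String Int) i =>
        if d.contains (g i) then d.insert (g i) (d.getD (g i) 0 + 1) else d.insert (g i) 1)
      PySem.Dict.empty).items
    = (PySem.List.dedup (l.map g)).map (fun m => (m, ((l.map g).count m : Int))) := by
  have hstep : (fun (d : PySem.Dict String Int) i =>
        if d.contains (g i) then d.insert (g i) (d.getD (g i) 0 + 1) else d.insert (g i) 1)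
      = (fun d i => (fun (d : PySem.Dict String Int) mot => d.insert mot (d.getD mot 0 + 1)) d (g i)) := by
    funext d i
    by_cases h : d.contains (g i) = true
    · simp [h]
    · simp only [Bool.not_eq_true] at h
      simp [h, PySem.Dict.getD_of_not_contains]
  have h2 : (l.map g).foldl (fun (d : PySem.Dict String Int) mot => d.insert mot (d.getD mot 0 + 1)) PySem.Dict.empty
      = l.foldl (fun d i => (fun (d : PySem.Dict String Int) mot => d.insert mot (d.getD mot 0 + 1)) d (g i)) PySem.Dict.empty :=
    List.foldl_map ..
  rw [hstep, ← h2, PySem.Dict.foldl_insert_getD_add_one_eq_counter,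
    PySem.Dict.items_counter, PySem.List.dedup_eq_ofList]

-- ===== VERDICT (by name: the statement is the Claim_ definition above) =====
theorem compte_mots_3_lettres_spec : Claim_equal_compte_mots_3_lettres := by
  intro sequence _
  exact pv_fold (PySem.List.pyRange 0 ((sequence.toList.length : Int) - 2) 1)
    (fun i => String.ofList (PySem.List.slice sequence.toList (some i) (some (i + 3))))
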